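-- pv_equiv track=rewrite | github.com/Progambler227788/CP-CompetativeProgramming | 800 Ratings/1957.py | solve
-- ===== SOURCE A (Python) =====
-- from collections import defaultdict
--
-- def maxMod(a):
--     maxi = 0
--     if a>=3:
--        maxi = max(maxi, a // 3, a//4, a//5, a//6, a//8) # 4/3 -> 1
--     # if a>=4:
--     #    maxi = max(maxi, a % 3, a%4, a%5, a%6, a%8)
--     # if a>=5:
--     #    maxi = max(maxi, a % 3, a%4, a%5, a%6, a%8)
--     # if
--
--     return maxi
--
-- def solve(sticks):
--     maping = defaultdict(int)
--     for i in sticks: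
--         maping[i]+=1
--     counts = 0
--     for _,value in maping.items():
--         counts += maxMod(value)
--     return counts
-- ===== SOURCE B (Python) =====
-- def solve(sticks):
--     acc = 0
--     run = 0
--     prev = None
--     for x in sorted(sticks):
--         if x == prev:
--             run += 1
--         else:
--             acc += run // 3
--             prev = x
--             run = 1
--     return acc + run // 3
-- ===== Notes on version B (the rewrite author's own statement) =====
-- stated objective: alternative
-- what changed: Replaces the defaultdict frequency map plus per-frequency max of five floor-divisions with a sort-then-scan: B sorts a copy of sticks and sums run_length // 3 at each value change (maxMod(a) equals a // 3 on counts).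
import Mathlib
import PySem

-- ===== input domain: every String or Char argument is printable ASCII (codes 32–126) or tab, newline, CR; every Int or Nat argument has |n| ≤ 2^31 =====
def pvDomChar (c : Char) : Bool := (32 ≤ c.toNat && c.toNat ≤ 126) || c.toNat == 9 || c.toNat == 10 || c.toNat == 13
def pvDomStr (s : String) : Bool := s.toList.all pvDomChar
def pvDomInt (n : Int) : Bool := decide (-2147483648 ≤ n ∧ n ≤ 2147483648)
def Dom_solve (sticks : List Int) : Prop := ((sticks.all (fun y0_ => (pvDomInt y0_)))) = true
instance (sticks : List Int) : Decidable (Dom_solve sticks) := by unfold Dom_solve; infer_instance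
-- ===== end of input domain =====

-- B replaces A's hash-map counting with a sort-then-scan over runs of equal values (alternative decomposition, same results).

-- ===== PORT A =====
def maxMod (a : Int) : Int :=
  let maxi : Int := 0
  if a ≥ 3 then
    max (max (max (max (max maxi (PySem.Int.floordiv a 3)) (PySem.Int.floordiv a 4))
      (PySem.Int.floordiv a 5)) (PySem.Int.floordiv a 6)) (PySem.Int.floordiv a 8)
  else maxi

def solve (sticks : List Int) : Int :=
  let maping := sticks.foldl (fun d i => d.modify i 0 (· + 1)) (PySem.Dict.empty : PySem.Dict Int Int)
  maping.items.foldl (fun counts p => counts + maxMod p.2) 0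

-- ===== PORT B =====
def solveAltStep (st : Int × Int × Option Int) (x : Int) : Int × Int × Option Int :=
  if some x = st.2.2 then (st.1, st.2.1 + 1, st.2.2)
  else (st.1 + PySem.Int.floordiv st.2.1 3, 1, some x)

def solve_alt (sticks : List Int) : Int :=
  let st := (PySem.List.sorted sticks (fun x => x) false).foldl solveAltStep (0, 0, none)
  st.1 + PySem.Int.floordiv st.2.1 3

-- ===== PRECONDITION & SPEC =====
def Spec_solve (sticks : List Int) (out : Int) : Prop := out = solve_alt sticks
instance (sticks : List Int) (out : Int) : Decidable (Spec_solve sticks out) := by unfold Spec_solve; infer_instance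

-- ===== CLAIM (what is proved, stated in full; the proofs are below) =====
def Claim_equal_solve : Prop := ∀ (sticks : List Int), Dom_solve sticks → Spec_solve sticks (solve sticks)

-- ===== LEMMAS AND PROOFS =====

-- common value: per distinct value, (count // 3), as an Int
def runCredit (l : List Int) (k : Int) : Int := ((l.count k / 3 : Nat) : Int)

lemma floordiv_nat3 (n : Nat) : PySem.Int.floordiv (n : Int) 3 = ((n / 3 : Nat) : Int) := by
  have h := PySem.Int.floordiv_natCast n 3
  exact_mod_cast h

lemma maxMod_natCast (c : Nat) : maxMod (c : Int) = ((c / 3 : Nat) : Int) := by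
  unfold maxMod
  by_cases h : (c : Int) ≥ 3
  · simp only [h, if_pos]
    have h3 : (3:Nat) ≤ c := by exact_mod_cast h
    rw [PySem.Int.floordiv_eq_ediv_of_pos (show (0:Int) < 3 by norm_num),
        PySem.Int.floordiv_eq_ediv_of_pos (show (0:Int) < 4 by norm_num),
        PySem.Int.floordiv_eq_ediv_of_pos (show (0:Int) < 5 by norm_num),
        PySem.Int.floordiv_eq_ediv_of_pos (show (0:Int) < 6 by norm_num),
        PySem.Int.floordiv_eq_ediv_of_pos (show (0:Int) < 8 by norm_num)]
    omega
  · simp only [h, if_neg, not_false_iff]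
    have : c < 3 := by exact_mod_cast not_le.mp h
    omega

lemma solve_eq_sum (sticks : List Int) :
    solve sticks = ((PySem.Set.ofList sticks).map (fun k => runCredit sticks k)).sum := by
  show ((PySem.Dict.counter sticks).items.foldl (fun counts p => counts + maxMod p.2) 0 : Int) = _
  rw [PySem.Dict.items_counter, PySem.List.foldl_add, List.map_map]
  simp only [zero_add]
  congr 1
  apply List.map_congr_left
  intro k _
  exact maxMod_natCast (sticks.count k)

def scanOut (st : Int × Int × Option Int) : Int := st.1 + PySem.Int.floordiv st.2.1 3

lemma scan_lemma (t : List Int) : ∀ (v acc run : Int), (∀ y ∈ t, v ≤ y) → t.Pairwise (· ≤ ·) →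
    scanOut (t.foldl solveAltStep (acc, run, some v))
      = acc + PySem.Int.floordiv (run + (t.count v : Int)) 3
        + (t.toFinset.erase v).sum (runCredit t) := by
  induction t with
  | nil => intro v acc run _ _; simp [scanOut]
  | cons y t' ih =>
    intro v acc run hall hp
    have hally : ∀ z ∈ t', y ≤ z := fun z hz => (List.pairwise_cons.mp hp).1 z hz
    have hp' : t'.Pairwise (· ≤ ·) := (List.pairwise_cons.mp hp).2
    by_cases hyv : y = v
    · subst hyv
      have : solveAltStep (acc, run, some y) y = (acc, run + 1, some y) := by
        simp [solveAltStep]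
      rw [List.foldl_cons, this, ih y acc (run + 1) hally hp']
      have hc : ((y :: t').count y : Int) = (t'.count y : Int) + 1 := by
        simp
      rw [hc]
      have hset : (y :: t').toFinset.erase y = t'.toFinset.erase y := by
        simp [List.toFinset_cons, Finset.erase_insert_eq_erase]
      rw [hset]
      have hsum : (t'.toFinset.erase y).sum (runCredit (y :: t'))
          = (t'.toFinset.erase y).sum (runCredit t') := by
        apply Finset.sum_congr rfl
        intro k hk
        have hne : k ≠ y := Finset.ne_of_mem_erase hk
        simp [runCredit, Ne.symm hne]
      rw [hsum]
      ring_nf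
    · -- y ≠ v: v closes its run; all of t' is ≥ y so v never reappears
      have hvy : v ≤ y := hall y (by simp)
      have hvnott' : v ∉ t' := by
        intro hv
        exact hyv (le_antisymm (hally v hv) hvy)
      have : solveAltStep (acc, run, some v) y
          = (acc + PySem.Int.floordiv run 3, 1, some y) := by
        simp [solveAltStep, hyv]
      rw [List.foldl_cons, this, ih y (acc + PySem.Int.floordiv run 3) 1 hally hp']
      have hcv : ((y :: t').count v : Int) = 0 := by
        simp [hyv, List.count_eq_zero_of_not_mem hvnott']
      rw [hcv, add_zero]
      have hvnot : v ∉ (y :: t').toFinset := by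
        simp [List.mem_toFinset]
        exact ⟨fun h => hyv h.symm, hvnott'⟩
      rw [Finset.erase_eq_self.mpr hvnot]
      have hyMem : y ∈ (y :: t').toFinset := by simp
      rw [← Finset.add_sum_erase _ _ hyMem]
      have hset : (y :: t').toFinset.erase y = t'.toFinset.erase y := by
        simp [List.toFinset_cons, Finset.erase_insert_eq_erase]
      rw [hset]
      have hsum : (t'.toFinset.erase y).sum (runCredit (y :: t'))
          = (t'.toFinset.erase y).sum (runCredit t') := by
        apply Finset.sum_congr rfl
        intro k hk
        have hne : k ≠ y := Finset.ne_of_mem_erase hk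
        simp [runCredit, Ne.symm hne]
      rw [hsum]
      have hcy : runCredit (y :: t') y = PySem.Int.floordiv (1 + (t'.count y : Int)) 3 := by
        have : ((y :: t').count y) = 1 + t'.count y := by simp; omega
        rw [runCredit, this]
        rw [show ((1 : Int) + (t'.count y : Int)) = (((1 + t'.count y : Nat) : Int)) by push_cast; ring]
        rw [floordiv_nat3]
      rw [hcy]
      ring_nf

lemma solve_alt_eq_sum (sticks : List Int) :
    solve_alt sticks = sticks.toFinset.sum (runCredit sticks) := by
  unfold solve_alt
  set ys := PySem.List.sorted sticks (fun x => x) false with hys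
  have hperm : ys.Perm sticks := PySem.List.sorted_perm sticks (fun x => x) false
  have hcnt : ∀ k, ys.count k = sticks.count k := fun k => hperm.count_eq k
  have htf : ys.toFinset = sticks.toFinset := by
    ext k; simp [List.mem_toFinset, hperm.mem_iff]
  have hcredit : runCredit ys = runCredit sticks := by
    funext k; simp [runCredit, hcnt k]
  have hpw : ys.Pairwise (· ≤ ·) := PySem.List.sorted_pairwise sticks (fun x => x)
  rw [← htf, ← hcredit]
  cases hy : ys with
  | nil => simp
  | cons x t =>
    have hstep : solveAltStep (0, 0, none) x = (0, 1, some x) := by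
      simp [solveAltStep]
    rw [hy] at hpw
    have hall : ∀ z ∈ t, x ≤ z := fun z hz => (List.pairwise_cons.mp hpw).1 z hz
    have hp' : t.Pairwise (· ≤ ·) := (List.pairwise_cons.mp hpw).2
    show scanOut ((x :: t).foldl solveAltStep (0, 0, none)) = _
    rw [List.foldl_cons, hstep, scan_lemma t x 0 1 hall hp']
    have hyMem : x ∈ (x :: t).toFinset := by simp
    rw [← Finset.add_sum_erase _ _ hyMem]
    have hset : (x :: t).toFinset.erase x = t.toFinset.erase x := by
      simp [List.toFinset_cons, Finset.erase_insert_eq_erase]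
    rw [hset]
    have hsum : (t.toFinset.erase x).sum (runCredit (x :: t))
        = (t.toFinset.erase x).sum (runCredit t) := by
      apply Finset.sum_congr rfl
      intro k hk
      have hne : k ≠ x := Finset.ne_of_mem_erase hk
      simp [runCredit, Ne.symm hne]
    rw [hsum]
    have hcx : runCredit (x :: t) x = PySem.Int.floordiv (1 + (t.count x : Int)) 3 := by
      have : ((x :: t).count x) = 1 + t.count x := by simp; omega
      rw [runCredit, this]
      rw [show ((1 : Int) + (t.count x : Int)) = (((1 + t.count x : Nat) : Int)) by push_cast; ring]
      rw [floordiv_nat3]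
    rw [hcx]
    ring_nf

lemma finset_sum_eq_set_sum (sticks : List Int) :
    sticks.toFinset.sum (runCredit sticks)
      = ((PySem.Set.ofList sticks).map (fun k => runCredit sticks k)).sum := by
  have hnd : (PySem.Set.ofList sticks).Nodup := PySem.Set.nodup_ofList sticks
  have htf : (PySem.Set.ofList sticks).toFinset = sticks.toFinset := by
    ext k
    simp [List.mem_toFinset, PySem.Set.mem_ofList]
  rw [← htf, List.sum_toFinset _ hnd]

-- ===== VERDICT (by name: the statement is the Claim_ definition above) =====
theorem solve_spec : Claim_equal_solve := by
  intro sticks _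
  show solve sticks = solve_alt sticks
  rw [solve_eq_sum, solve_alt_eq_sum, finset_sum_eq_set_sum]
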